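-- pv_equiv track=rewrite | github.com/hi1d/algorithm | 20220309.py | solution
-- ===== SOURCE A (Python) =====
-- def solution(S):
--     list = []
--     if 'a' not in S:
--         return True
--     for i in S:
--         list.append(i)
--         if i == 'a' and 'b' in list:
--             return False
--     return True
-- ===== SOURCE B (Python) =====
-- def solution(S):
--     i = S.find('b')
--     if i == -1:
--         return True
--     return 'a' not in S[i+1:]
-- ===== Notes on version B (the rewrite author's own statement) =====
-- stated objective: simpler
-- what changed: Replaces the char-by-char loop with a growing prefix list (rescanned for 'b' at every 'a') by a single find of the first 'b' plus one membership test for 'a' in the suffix after it.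
import Mathlib
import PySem

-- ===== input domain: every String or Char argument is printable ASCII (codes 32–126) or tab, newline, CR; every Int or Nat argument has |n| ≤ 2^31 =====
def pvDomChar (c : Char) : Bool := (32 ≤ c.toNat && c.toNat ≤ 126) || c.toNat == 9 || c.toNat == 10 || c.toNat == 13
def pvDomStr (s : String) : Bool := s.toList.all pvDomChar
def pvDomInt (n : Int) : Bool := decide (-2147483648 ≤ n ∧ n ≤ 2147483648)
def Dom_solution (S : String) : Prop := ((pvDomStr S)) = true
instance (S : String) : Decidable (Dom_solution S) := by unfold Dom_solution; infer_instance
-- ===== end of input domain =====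

-- B replaces A's loop with a growing prefix list by one find('b') plus a suffix membership test (simpler).

-- ===== PORT A =====
-- the for-loop with the growing prefix list and the early 'return False'
def solutionLoop : List Char → List Char → Bool
  | [], _ => true
  | c :: rest, acc =>
    let acc' := acc ++ [c]
    if c == 'a' && acc'.contains 'b' then false else solutionLoop rest acc'

def solution (S : String) : Bool :=
  if !(PySem.Str.isIn "a" S) then true
  else solutionLoop S.toList []

-- ===== PORT B =====
def solution_alt (S : String) : Bool :=
  let i := PySem.Str.find S "b"
  if i == -1 then true
  else !(PySem.Str.isIn "a" (PySem.Str.slice S (some (i + 1)) none))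

-- ===== PRECONDITION & SPEC =====
def Spec_solution (S : String) (out : Bool) : Prop := out = solution_alt S
instance (S : String) (out : Bool) : Decidable (Spec_solution S out) := by unfold Spec_solution; infer_instance

-- ===== CLAIM (what is proved, stated in full; the proofs are below) =====
def Claim_equal_solution : Prop := ∀ (S : String), Dom_solution S → Spec_solution S (solution S)

-- ===== LEMMAS AND PROOFS =====

-- A's loop state matters only through "has a 'b' been seen"
def auxLoop : List Char → Bool → Bool
  | [], _ => true
  | c :: rest, bb =>
    if c == 'a' && (bb || c == 'b') then false else auxLoop rest (bb || c == 'b')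

theorem solutionLoop_eq_aux (l acc : List Char) :
    solutionLoop l acc = auxLoop l (acc.contains 'b') := by
  induction l generalizing acc with
  | nil => rfl
  | cons c rest ih =>
    have h : (acc ++ [c]).contains 'b' = (acc.contains 'b' || c == 'b') := by
      simp only [List.contains_append, List.contains_cons, List.contains_nil,
        Bool.or_false]
      by_cases hc : c = 'b'
      · simp [hc]
      · rw [beq_eq_false_iff_ne.mpr (Ne.symm hc), beq_eq_false_iff_ne.mpr hc]
    simp only [solutionLoop, auxLoop, ih, h]

theorem aux_no_a (l : List Char) (bb : Bool) (h : 'a' ∉ l) : auxLoop l bb = true := by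
  induction l generalizing bb with
  | nil => rfl
  | cons c rest ih =>
    simp only [List.mem_cons, not_or] at h
    simp only [auxLoop]
    have hc : (c == 'a') = false := by simp [Ne.symm h.1]
    simp [hc, ih _ h.2]

theorem aux_true (l : List Char) : auxLoop l true = !(l.contains 'a') := by
  induction l with
  | nil => rfl
  | cons c rest ih =>
    simp only [auxLoop, List.contains_cons]
    by_cases hc : c = 'a'
    · subst hc; simp
    · have h1 : (c == 'a') = false := by simp [hc]
      have h2 : ('a' == c) = false := by simp [Ne.symm hc]
      simp [h1, h2, ih]

theorem aux_no_b (l : List Char) (h : 'b' ∉ l) : auxLoop l false = true := by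
  induction l with
  | nil => rfl
  | cons c rest ih =>
    simp only [List.mem_cons, not_or] at h
    have hb : (c == 'b') = false := by simp [Ne.symm h.1]
    simp [auxLoop, hb, ih h.2]

theorem aux_skip (t l : List Char) (ht : 'b' ∉ t) :
    auxLoop (t ++ l) false = auxLoop l false := by
  induction t with
  | nil => rfl
  | cons c rest ih =>
    simp only [List.mem_cons, not_or] at ht
    have hb : (c == 'b') = false := by simp [Ne.symm ht.1]
    simp only [List.cons_append, auxLoop, hb, Bool.or_false, Bool.and_false]
    exact ih ht.2

theorem singleton_infix {x : Char} {l : List Char} : [x] <:+: l ↔ x ∈ l := by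
  constructor
  · rintro ⟨s, t, h⟩; subst h; simp
  · intro h
    obtain ⟨s, t, h⟩ := List.append_of_mem h
    exact ⟨s, t, by simp [h]⟩

theorem solution_eq_aux (S : String) : solution S = auxLoop S.toList false := by
  unfold solution
  split
  · next h =>
    have : ¬ ('a' ∈ S.toList) := by
      simp only [Bool.not_eq_eq_eq_not, Bool.not_true] at h
      intro hmem
      rw [PySem.Str.isIn_eq] at h
      rw [PySem.Chars.isIn_eq_false_iff] at h
      exact h (by simpa [singleton_infix] using hmem)
    exact (aux_no_a _ _ this).symm
  · simpa using solutionLoop_eq_aux S.toList []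

-- ===== VERDICT (by name: the statement is the Claim_ definition above) =====
theorem solution_spec : Claim_equal_solution := by
  intro S _
  unfold Spec_solution solution_alt
  rw [solution_eq_aux]
  set l := S.toList with hl
  by_cases hb : PySem.Str.find S "b" = -1
  · -- no 'b' in S
    have hnb : 'b' ∉ l := by
      rw [PySem.Str.find_eq_neg_one_iff] at hb
      intro hm; exact hb (by simpa [singleton_infix] using hm)
    simp only [hb, beq_self_eq_true, if_true]
    exact aux_no_b _ hnb
  · -- first 'b' at index i
    have hpos : 0 ≤ PySem.Str.find S "b" := by
      rw [PySem.Str.find_nonneg_iff]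
      rw [PySem.Str.find_eq_neg_one_iff] at hb
      exact not_not.mp hb
    have hbne : (PySem.Str.find S "b" == -1) = false := by
      simpa using hb
    have hfind : PySem.Str.find S "b" = PySem.Chars.find l "b".toList := by
      simp [hl]
    set i := PySem.Str.find S "b" with hi
    set n := i.toNat with hn
    have hspec := PySem.Chars.find_spec (s := l) (sub := "b".toList) (by rw [← hfind]; exact hpos)
    rw [← hfind] at hspec
    obtain ⟨hpre, hmin⟩ := hspec
    have hsub : "b".toList = ['b'] := rfl
    rw [hsub] at hpre hmin
    -- drop n starts with 'b'
    obtain ⟨t, ht⟩ := hpre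
    have hlen : n < l.length := by
      rcases Nat.lt_or_ge n l.length with h | h
      · exact h
      · rw [List.drop_eq_nil_of_le h] at ht
        simp at ht
    have hget : l[n] = 'b' := by
      have h2 := ht
      rw [List.drop_eq_getElem_cons hlen] at h2
      simp only [List.cons_append, List.nil_append, List.cons.injEq] at h2
      exact h2.1.symm
    have hdrop : l.drop n = 'b' :: l.drop (n + 1) := by
      rw [List.drop_eq_getElem_cons hlen, hget]
    have hnb : 'b' ∉ l.take n := by
      intro hm
      obtain ⟨j, hj, hjv⟩ := List.getElem_of_mem hm
      have hjn : j < n := lt_of_lt_of_le hj (by simp [List.length_take])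
      have hjl : j < l.length := lt_trans hjn hlen
      apply hmin j hjn
      rw [List.drop_eq_getElem_cons hjl]
      refine ⟨l.drop (j+1), ?_⟩
      have : l[j] = 'b' := by
        rw [← hjv]; simp [List.getElem_take]
      simp [this]
    -- A's side
    have hA : auxLoop l false = !((l.drop (n+1)).contains 'a') := by
      conv_lhs => rw [← List.take_append_drop n l, hdrop]
      rw [aux_skip _ _ hnb]
      have : auxLoop ('b' :: l.drop (n+1)) false = auxLoop (l.drop (n+1)) true := by
        simp [auxLoop]
      rw [this, aux_true]
    -- B's side
    have hslice : (PySem.Str.slice S (some (i + 1)) none).toList = l.drop (n+1) := by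
      rw [PySem.Str.toList_slice, hl, PySem.Chars.slice_eq_listSlice]
      rw [PySem.List.slice_from S.toList (a := i + 1) (by omega)]
      have : (i + 1).toNat = n + 1 := by omega
      rw [this]
    have hIn : PySem.Str.isIn "a" (PySem.Str.slice S (some (i + 1)) none) = (l.drop (n+1)).contains 'a' := by
      rcases h : (l.drop (n+1)).contains 'a' with _ | _
      · rw [PySem.Str.isIn_eq, PySem.Chars.isIn_eq_false_iff, hslice]
        intro hinf
        rw [show ("a" : String).toList = ['a'] from rfl, singleton_infix] at hinf
        simp_all
      · rw [PySem.Str.isIn_eq]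
        have : ('a' : Char) ∈ l.drop (n+1) := by simpa using h
        have := singleton_infix.mpr this
        rw [hslice]
        simpa [PySem.Chars.isIn_iff_infix] using this
    rw [hA]
    simp only [hbne, Bool.false_eq_true, if_false]
    rw [hIn]
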